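-- pv_equiv track=rewrite | github.com/slevgolo/rmv_delays | delays.py | replace_umlaute
-- ===== SOURCE A (Python) =====
-- def replace_umlaute(astring):
--     unicodes = {
--         'Ä': '&#196;',
--         'ä': '&#228;',
--         'Ö': '&#214;',
--         'ö': '&#246;',
--         'Ü': '&#220;',
--         'ü': '&#252;',
--         'ß': '&#223;'
--     }
--
--     for key, value in unicodes.items():
--         astring = astring.replace(value, key)
--     return astring
-- ===== SOURCE B (Python) =====
-- def replace_umlaute(astring):
--     # Single left-to-right pass: find '&#<digits>;' tokens and map the known
--     # seven entities to their umlaut characters; everything else is copied.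
--     mapping = {
--         '&#196;': 'Ä',
--         '&#228;': 'ä',
--         '&#214;': 'Ö',
--         '&#246;': 'ö',
--         '&#220;': 'Ü',
--         '&#252;': 'ü',
--         '&#223;': 'ß',
--     }
--     out = []
--     i = 0
--     n = len(astring)
--     while i < n:
--         c = astring[i]
--         if c == '&' and i + 1 < n and astring[i + 1] == '#':
--             j = i + 2
--             while j < n and '0' <= astring[j] <= '9':
--                 j += 1
--             if j > i + 2 and j < n and astring[j] == ';':
--                 tok = astring[i:j + 1]
--                 out.append(mapping.get(tok, tok))
--                 i = j + 1
--                 continue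
--         out.append(c)
--         i += 1
--     return ''.join(out)
-- ===== Notes on version B (the rewrite author's own statement) =====
-- stated objective: alternative
-- what changed: A makes seven sequential full-string .replace passes (one per entity); B makes a single left-to-right scan that recognises ampersand-hash-digits-semicolon tokens and maps the seven known entities through one lookup table, copying all other text unchanged (asymptotically one pass instead of seven, but in CPython A's C-level replace is faster in wall-clock).
import Mathlib
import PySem

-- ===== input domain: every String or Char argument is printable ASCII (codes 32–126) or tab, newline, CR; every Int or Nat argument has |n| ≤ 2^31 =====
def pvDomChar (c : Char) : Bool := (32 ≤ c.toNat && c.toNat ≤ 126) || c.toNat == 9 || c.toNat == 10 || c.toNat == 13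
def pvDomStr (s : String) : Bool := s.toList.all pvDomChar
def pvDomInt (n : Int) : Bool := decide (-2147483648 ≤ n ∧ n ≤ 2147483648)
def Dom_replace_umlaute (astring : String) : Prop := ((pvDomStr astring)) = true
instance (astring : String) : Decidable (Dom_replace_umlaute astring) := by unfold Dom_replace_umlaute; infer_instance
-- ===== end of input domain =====

-- B replaces A's seven sequential whole-string .replace passes by one
-- left-to-right scan with a token lookup table (objective: alternative).

-- ===== PORT A =====
-- the dict literal, iterated in insertion order; astring = astring.replace(value, key)
def replace_umlaute (astring : String) : String :=
  let unicodes : PySem.Dict String String := PySem.Dict.ofList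
    [("Ä", "&#196;"), ("ä", "&#228;"), ("Ö", "&#214;"), ("ö", "&#246;"),
     ("Ü", "&#220;"), ("ü", "&#252;"), ("ß", "&#223;")]
  unicodes.items.foldl (fun astring kv => PySem.Str.replace astring kv.2 kv.1) astring

-- ===== PORT B =====
-- '0' <= c <= '9'
def pvDig (c : Char) : Bool := '0' ≤ c && c ≤ '9'

-- the inner `while j < n and '0' <= astring[j] <= '9'` loop: (digit run, remainder)
def pvDigits : List Char → List Char × List Char
  | [] => ([], [])
  | c :: t => if pvDig c then ((pvDigits t).1.cons c, (pvDigits t).2) else ([], c :: t)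

-- the `mapping` dict of Source B, keyed by entity token
def pvMap : List (List Char × Char) :=
  [(['&','#','1','9','6',';'], 'Ä'), (['&','#','2','2','8',';'], 'ä'),
   (['&','#','2','1','4',';'], 'Ö'), (['&','#','2','4','6',';'], 'ö'),
   (['&','#','2','2','0',';'], 'Ü'), (['&','#','2','5','2',';'], 'ü'),
   (['&','#','2','2','3',';'], 'ß')]

-- mapping.get(tok, tok)
def pvEnt (tok : List Char) : List Char :=
  match pvMap.lookup tok with
  | some u => [u]
  | none => tok

theorem pvDigits_snd_length (l : List Char) : (pvDigits l).2.length ≤ l.length := by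
  induction l with
  | nil => simp [pvDigits]
  | cons c t ih =>
    simp only [pvDigits]
    split
    · exact le_trans ih (by simp)
    · simp

-- the outer while loop of Source B, one pass over the characters
def pvScan : List Char → List Char
  | [] => []
  | '&' :: '#' :: t2 =>
    if (pvDigits t2).1 ≠ [] ∧ (pvDigits t2).2.head? = some ';' then
      pvEnt ('&' :: '#' :: (pvDigits t2).1 ++ [';']) ++ pvScan (pvDigits t2).2.tail
    else
      '&' :: pvScan ('#' :: t2)
  | c :: t => c :: pvScan t
termination_by s => s.length
decreasing_by
  · have h1 := pvDigits_snd_length t2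
    have h2 : (pvDigits t2).2.tail.length ≤ (pvDigits t2).2.length := by
      cases (pvDigits t2).2 <;> simp
    simp only [List.length_cons]; omega
  · simp
  · simp

def replace_umlaute_alt (astring : String) : String :=
  String.ofList (pvScan astring.toList)

-- ===== PRECONDITION & SPEC =====
def Spec_replace_umlaute (astring : String) (out : String) : Prop := out = replace_umlaute_alt astring
instance (astring : String) (out : String) : Decidable (Spec_replace_umlaute astring out) := by unfold Spec_replace_umlaute; infer_instance

-- ===== CLAIM (what is proved, stated in full; the proofs are below) =====
def Claim_equal_replace_umlaute : Prop := ∀ (astring : String), Dom_replace_umlaute astring → Spec_replace_umlaute astring (replace_umlaute astring)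

-- ===== LEMMAS AND PROOFS =====

def pvRep (k : List Char) (u : Char) : List Char → List Char
  | [] => []
  | c :: t =>
    if k.isPrefixOf (c :: t) then u :: pvRep k u (t.drop (k.length - 1))
    else c :: pvRep k u t
termination_by s => s.length
decreasing_by
  · simp only [List.length_cons, List.length_drop]; omega
  · simp

theorem pv_go_eq (k : List Char) (u : Char) (hk : k ≠ []) :
    ∀ fuel l acc, l.length ≤ fuel →
      PySem.Chars.replace.go k [u] fuel l acc = acc.reverse ++ pvRep k u l := by
  intro fuel
  induction fuel with
  | zero =>
    intro l acc hl
    have : l = [] := by cases l <;> simp_all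
    subst this
    rw [PySem.Chars.replace.go.eq_def]
    simp [pvRep]
  | succ n ih =>
    intro l acc hl
    cases l with
    | nil => rw [PySem.Chars.replace.go.eq_def]; simp [pvRep]
    | cons c t =>
      rw [PySem.Chars.replace.go.eq_def]
      simp only
      by_cases hp : k.isPrefixOf (c :: t)
      · rw [if_pos hp]
        rcases k with _ | ⟨kh, kt⟩
        · exact absurd rfl hk
        · have hdrop : List.drop (kh :: kt).length (c :: t) = t.drop ((kh :: kt).length - 1) := by
            simp [List.length_cons]
          rw [hdrop]
          rw [ih _ _ (by simp only [List.length_cons, List.length_drop] at hl ⊢; omega)]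
          rw [pvRep, if_pos hp]
          simp
      · rw [if_neg hp]
        rw [ih _ _ (by simp only [List.length_cons] at hl; omega)]
        rw [pvRep, if_neg hp]
        simp

theorem pv_replace_eq (k : List Char) (u : Char) (hk : k ≠ []) (s : List Char) :
    PySem.Chars.replace s k [u] = pvRep k u s := by
  rw [PySem.Chars.replace]
  rw [if_neg (by simp [List.isEmpty_iff, hk])]
  rw [pv_go_eq k u hk s.length s [] le_rfl]
  simp

def pvPairs : List (Char × List Char) :=
  [('Ä', ['&','#','1','9','6',';']), ('ä', ['&','#','2','2','8',';']),
   ('Ö', ['&','#','2','1','4',';']), ('ö', ['&','#','2','4','6',';']),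
   ('Ü', ['&','#','2','2','0',';']), ('ü', ['&','#','2','5','2',';']),
   ('ß', ['&','#','2','2','3',';'])]

def pvFold (ps : List (Char × List Char)) (s : List Char) : List Char :=
  ps.foldl (fun s p => pvRep p.2 p.1 s) s

theorem pvA_eq (s : String) :
    replace_umlaute s = String.ofList (pvFold pvPairs s.toList) := by
  have hitems : (PySem.Dict.ofList (κ := String) (ν := String)
      [("Ä", "&#196;"), ("ä", "&#228;"), ("Ö", "&#214;"), ("ö", "&#246;"),
       ("Ü", "&#220;"), ("ü", "&#252;"), ("ß", "&#223;")]).items =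
      [("Ä", "&#196;"), ("ä", "&#228;"), ("Ö", "&#214;"), ("ö", "&#246;"),
       ("Ü", "&#220;"), ("ü", "&#252;"), ("ß", "&#223;")] := by decide
  simp only [replace_umlaute, hitems, List.foldl, pvFold, pvPairs]
  simp only [PySem.Str.replace, String.toList_ofList]
  simp only [show "&#196;".toList = ['&','#','1','9','6',';'] from by decide,
    show "&#228;".toList = ['&','#','2','2','8',';'] from by decide,
    show "&#214;".toList = ['&','#','2','1','4',';'] from by decide,
    show "&#246;".toList = ['&','#','2','4','6',';'] from by decide,
    show "&#220;".toList = ['&','#','2','2','0',';'] from by decide,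
    show "&#252;".toList = ['&','#','2','5','2',';'] from by decide,
    show "&#223;".toList = ['&','#','2','2','3',';'] from by decide,
    show "Ä".toList = ['Ä'] from by decide, show "ä".toList = ['ä'] from by decide,
    show "Ö".toList = ['Ö'] from by decide, show "ö".toList = ['ö'] from by decide,
    show "Ü".toList = ['Ü'] from by decide, show "ü".toList = ['ü'] from by decide,
    show "ß".toList = ['ß'] from by decide]
  rw [pv_replace_eq _ _ (by decide), pv_replace_eq _ _ (by decide),
      pv_replace_eq _ _ (by decide), pv_replace_eq _ _ (by decide),
      pv_replace_eq _ _ (by decide), pv_replace_eq _ _ (by decide),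
      pv_replace_eq _ _ (by decide)]

theorem pvRep_cons_not_prefix (k : List Char) (u c : Char) (t : List Char)
    (h : ¬ k <+: c :: t) : pvRep k u (c :: t) = c :: pvRep k u t := by
  rw [pvRep, if_neg (by rw [List.isPrefixOf_iff_prefix]; exact h)]

theorem pvRep_hit (k : List Char) (u : Char) (hk : k ≠ []) (r : List Char) :
    pvRep k u (k ++ r) = u :: pvRep k u r := by
  rcases k with _ | ⟨kh, kt⟩
  · exact absurd rfl hk
  · rw [List.cons_append, pvRep,
      if_pos (by rw [List.isPrefixOf_iff_prefix]; exact ⟨r, by simp⟩)]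
    simp [List.drop_left']

theorem pvRep_no_amp (k : List Char) (u : Char) (hk : k.head? = some '&') :
    ∀ xs rest, (∀ c ∈ xs, c ≠ '&') → pvRep k u (xs ++ rest) = xs ++ pvRep k u rest := by
  intro xs
  induction xs with
  | nil => simp
  | cons x t ih =>
    intro rest hx
    have hnp : ¬ k <+: x :: (t ++ rest) := by
      intro hpre
      rcases k with _ | ⟨kh, kt⟩
      · simp at hk
      · rw [List.cons_prefix_cons] at hpre
        simp only [List.head?_cons, Option.some.injEq] at hk
        exact hx x (by simp) (by rw [← hpre.1, hk])
    rw [List.cons_append, pvRep_cons_not_prefix _ _ _ _ hnp,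
      ih rest (fun c hc => hx c (by simp [hc]))]
    simp

theorem pvRep_prefix_transfer (k : List Char) (u : Char) :
    ∀ cs t, u ∉ t → t <+: pvRep k u cs → t <+: cs := by
  intro cs
  induction cs with
  | nil => intro t _ h; simpa [pvRep] using h
  | cons c cs' ih =>
      intro t hu h
      by_cases hp : k.isPrefixOf (c :: cs')
      · rw [pvRep, if_pos hp] at h
        cases t with
        | nil => exact List.nil_prefix
        | cons th tt =>
          rw [List.cons_prefix_cons] at h
          exact absurd h.1.symm (by intro he; exact hu (he ▸ List.mem_cons_self))
      · rw [pvRep, if_neg hp] at h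
        cases t with
        | nil => exact List.nil_prefix
        | cons th tt =>
          rw [List.cons_prefix_cons] at h ⊢
          refine ⟨h.1, ?_⟩
          exact ih tt (fun hm => hu (by simp [hm])) h.2

theorem pvRep_skip_key (k : List Char) (u : Char) (ki r : List Char)
    (hk : k.head? = some '&') (hlen : k.length ≤ ki.length) (hnp : ¬ k <+: ki)
    (htl : ∀ c ∈ ki.tail, c ≠ '&') :
    pvRep k u (ki ++ r) = ki ++ pvRep k u r := by
  rcases ki with _ | ⟨a, t⟩
  · cases k <;> simp_all
  · have hnp' : ¬ k <+: (a :: t) ++ r := by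
      intro h
      exact hnp (List.prefix_of_prefix_length_le h (List.prefix_append _ _) (by simpa using hlen))
    rw [List.cons_append, pvRep_cons_not_prefix _ _ _ _ (by simpa using hnp'),
      pvRep_no_amp k u hk t r (by simpa using htl)]
    simp

theorem pvFold_cons (c : Char) : ∀ ps, (∀ p ∈ ps, ∀ q ∈ ps, p.1 ∉ q.2) →
    ∀ cs, (∀ p ∈ ps, ¬ p.2 <+: c :: cs) →
    pvFold ps (c :: cs) = c :: pvFold ps cs := by
  intro ps
  induction ps with
  | nil => intro _ cs _; rfl
  | cons p ps' ih =>
    intro hmem cs hnp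
    have hp := hnp p (by simp)
    simp only [pvFold, List.foldl_cons]
    rw [pvRep_cons_not_prefix _ _ _ _ hp]
    have hmem' : ∀ a ∈ ps', ∀ q ∈ ps', a.1 ∉ q.2 :=
      fun a ha q hq => hmem a (by simp [ha]) q (by simp [hq])
    have hnp' : ∀ q ∈ ps', ¬ q.2 <+: c :: pvRep p.2 p.1 cs := by
      intro q hq h
      cases hq2 : q.2 with
      | nil => exact hnp q (by simp [hq]) (hq2 ▸ List.nil_prefix)
      | cons qh qt =>
        rw [hq2, List.cons_prefix_cons] at h
        have : qt <+: cs :=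
          pvRep_prefix_transfer p.2 p.1 cs qt
            (fun hm => hmem p (by simp) q (by simp [hq]) (by rw [hq2]; exact List.mem_cons_of_mem _ hm)) h.2
        exact hnp q (by simp [hq]) (by rw [hq2, List.cons_prefix_cons]; exact ⟨h.1, this⟩)
    exact ih hmem' (pvRep p.2 p.1 cs) hnp'

theorem pvFold_cons_ne_amp (c : Char) (hc : c ≠ '&') : ∀ ps, (∀ p ∈ ps, p.2.head? = some '&') →
    ∀ cs, pvFold ps (c :: cs) = c :: pvFold ps cs := by
  intro ps
  induction ps with
  | nil => intro _ cs; rfl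
  | cons p ps' ih =>
    intro hh cs
    simp only [pvFold, List.foldl_cons]
    rw [pvRep_cons_not_prefix _ _ _ _ (by
      intro hpre
      have := hh p (by simp)
      rcases hp2 : p.2 with _ | ⟨ph, pt⟩
      · rw [hp2] at this; simp at this
      · rw [hp2] at this hpre; simp only [List.head?_cons, Option.some.injEq] at this
        rw [List.cons_prefix_cons] at hpre
        exact hc (by rw [← hpre.1, this]))]
    exact ih (fun q hq => hh q (by simp [hq])) (pvRep p.2 p.1 cs)

theorem pvFold_hit (u : Char) (k : List Char) :
    ∀ ps, (∀ p ∈ ps, p.2.head? = some '&' ∧ (∀ c ∈ p.2.tail, c ≠ '&') ∧ p.1 ≠ '&' ∧ p.2.length = 6) →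
      (∀ p ∈ ps, ∀ q ∈ ps, p ≠ q → ¬ p.2 <+: q.2) →
      (u, k) ∈ ps → k.length = 6 →
      ∀ r, pvFold ps (k ++ r) = u :: pvFold ps r := by
  intro ps
  induction ps with
  | nil => intro _ _ h; simp at h
  | cons p ps' ih =>
    intro hgood hmut hm hk6 r
    by_cases hpe : p = (u, k)
    · subst hpe
      simp only [pvFold, List.foldl_cons]
      have hk : k ≠ [] := by intro h; rw [h] at hk6; simp at hk6
      rw [pvRep_hit k u hk r]
      have hu : u ≠ '&' := (hgood (u, k) (by simp)).2.2.1
      have hh : ∀ q ∈ ps', q.2.head? = some '&' := fun q hq => (hgood q (by simp [hq])).1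
      exact pvFold_cons_ne_amp u hu ps' hh _
    · have hm' : (u, k) ∈ ps' := by
        rcases List.mem_cons.mp hm with h | h
        · exact absurd h.symm hpe
        · exact h
      simp only [pvFold, List.foldl_cons]
      rw [pvRep_skip_key p.2 p.1 k r (hgood p (by simp)).1
        (by rw [hk6, (hgood p (by simp)).2.2.2])
        (hmut p (by simp) (u, k) (by simp [hm']) (by simpa using hpe))
        (by
          intro c hc
          have h1 := (hgood (u, k) (by simp [hm'])).2.1
          exact h1 c hc)]
      exact ih (fun q hq => hgood q (by simp [hq]))
        (fun a ha b hb hab => hmut a (by simp [ha]) b (by simp [hb]) hab) hm' hk6 (pvRep p.2 p.1 r)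

theorem pvDig_ne_amp {c : Char} (h : pvDig c = true) : c ≠ '&' := by
  intro he; rw [he] at h; exact absurd h (by decide)

theorem pvDig_ne_semi {c : Char} (h : pvDig c = true) : c ≠ ';' := by
  intro he; rw [he] at h; exact absurd h (by decide)

theorem pv_not_prefix_code (code ds rest : List Char) (hc3 : code.length = 3)
    (hcd : ∀ c ∈ code, pvDig c = true) (hds : ∀ c ∈ ds, pvDig c = true)
    (hne : ds ≠ code) : ¬ (code ++ [';']) <+: (ds ++ ';' :: rest) := by
  intro h
  rcases lt_trichotomy ds.length 3 with hl | hl | hl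
  · have hi : ds.length < (code ++ [';']).length := by simp [hc3]; omega
    have := h.getElem hi
    rw [List.getElem_append_left (by omega)] at this
    rw [List.getElem_append_right (le_refl _)] at this
    simp only [Nat.sub_self, List.getElem_cons_zero] at this
    exact pvDig_ne_semi (hcd _ (List.getElem_mem _)) this
  · apply hne
    apply List.ext_getElem (by omega)
    intro i h1 h2
    have hi : i < (code ++ [';']).length := by simp [hc3]; omega
    have := h.getElem hi
    rw [List.getElem_append_left (by omega), List.getElem_append_left (by omega)] at this
    exact this.symm
  · have hi : 3 < (code ++ [';']).length := by simp [hc3]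
    have := h.getElem hi
    rw [List.getElem_append_right (by omega)] at this
    rw [List.getElem_append_left (by omega)] at this
    simp only [hc3, Nat.sub_self, List.getElem_cons_zero] at this
    exact pvDig_ne_semi (hds _ (List.getElem_mem _)) this.symm

theorem pvRep_tok (code : List Char) (u : Char) (ds r : List Char) (hc3 : code.length = 3)
    (hcd : ∀ c ∈ code, pvDig c = true) (hds : ∀ c ∈ ds, pvDig c = true) (hne : ds ≠ code) :
    pvRep ('&' :: '#' :: (code ++ [';'])) u ('&' :: '#' :: (ds ++ ';' :: r)) =
      '&' :: '#' :: (ds ++ ';' :: pvRep ('&' :: '#' :: (code ++ [';'])) u r) := by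
  rw [pvRep_cons_not_prefix _ _ _ _ (by
    rw [List.cons_prefix_cons]
    rintro ⟨-, h⟩
    rw [List.cons_prefix_cons] at h
    exact pv_not_prefix_code code ds r hc3 hcd hds hne h.2)]
  rw [pvRep_cons_not_prefix _ _ _ _ (by rw [List.cons_prefix_cons]; rintro ⟨h, -⟩; exact absurd h (by decide))]
  rw [pvRep_no_amp _ _ (by simp) ds (';' :: r) (fun c hc => pvDig_ne_amp (hds c hc))]
  rw [pvRep_cons_not_prefix _ _ _ _ (by rw [List.cons_prefix_cons]; rintro ⟨h, -⟩; exact absurd h (by decide))]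

theorem pvFold_tok (ds : List Char) (hds : ∀ c ∈ ds, pvDig c = true) :
    ∀ ps, (∀ p ∈ ps, ∃ code, p.2 = '&' :: '#' :: (code ++ [';']) ∧ code.length = 3 ∧
        (∀ c ∈ code, pvDig c = true) ∧ ds ≠ code) →
      ∀ r, pvFold ps ('&' :: '#' :: (ds ++ ';' :: r)) = '&' :: '#' :: (ds ++ ';' :: pvFold ps r) := by
  intro ps
  induction ps with
  | nil => intro _ r; rfl
  | cons p ps' ih =>
    intro hsh r
    obtain ⟨code, hpc, hc3, hcd, hne⟩ := hsh p (by simp)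
    simp only [pvFold, List.foldl_cons, hpc]
    rw [pvRep_tok code p.1 ds r hc3 hcd hds hne]
    exact ih (fun q hq => hsh q (by simp [hq])) _

theorem pvDigits_eq (t : List Char) : t = (pvDigits t).1 ++ (pvDigits t).2 := by
  induction t with
  | nil => rfl
  | cons c t ih =>
    simp only [pvDigits]
    split
    · simpa using ih
    · simp

theorem pvDigits_fst_dig (t : List Char) : ∀ c ∈ (pvDigits t).1, pvDig c = true := by
  induction t with
  | nil => simp [pvDigits]
  | cons c t ih =>
    simp only [pvDigits]
    split
    · intro x hx
      rcases List.mem_cons.mp hx with h | h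
      · subst h; assumption
      · exact ih x h
    · simp

theorem pvDigits_stop (ds : List Char) (c0 : Char) (r : List Char)
    (hds : ∀ c ∈ ds, pvDig c = true) (hc0 : pvDig c0 = false) :
    pvDigits (ds ++ c0 :: r) = (ds, c0 :: r) := by
  induction ds with
  | nil => simp [pvDigits, hc0]
  | cons d t ih =>
    simp only [List.cons_append, pvDigits]
    rw [if_pos (hds d (by simp)), ih (fun c hc => hds c (by simp [hc]))]

theorem pvTok_beq_false (ds code : List Char) (hne : ds ≠ code) :
    (('&' :: '#' :: (ds ++ [';'])) == ('&' :: '#' :: (code ++ [';']))) = false := by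
  rw [beq_eq_false_iff_ne]
  intro he
  apply hne
  simpa [List.append_left_inj] using he

theorem pvEnt_unknown (ds : List Char)
    (h1 : ds ≠ ['1','9','6']) (h2 : ds ≠ ['2','2','8']) (h3 : ds ≠ ['2','1','4'])
    (h4 : ds ≠ ['2','4','6']) (h5 : ds ≠ ['2','2','0']) (h6 : ds ≠ ['2','5','2'])
    (h7 : ds ≠ ['2','2','3']) :
    pvEnt ('&' :: '#' :: (ds ++ [';'])) = '&' :: '#' :: (ds ++ [';']) := by
  have e1 := pvTok_beq_false ds ['1','9','6'] h1
  have e2 := pvTok_beq_false ds ['2','2','8'] h2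
  have e3 := pvTok_beq_false ds ['2','1','4'] h3
  have e4 := pvTok_beq_false ds ['2','4','6'] h4
  have e5 := pvTok_beq_false ds ['2','2','0'] h5
  have e6 := pvTok_beq_false ds ['2','5','2'] h6
  have e7 := pvTok_beq_false ds ['2','2','3'] h7
  simp only [List.cons_append, List.nil_append] at e1 e2 e3 e4 e5 e6 e7
  simp [pvEnt, pvMap, List.lookup, e1, e2, e3, e4, e5, e6, e7]

theorem pvPairs_shape (p : Char × List Char) (hp : p ∈ pvPairs) :
    ∃ code, p.2 = '&' :: '#' :: (code ++ [';']) ∧ code.length = 3 ∧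
      (∀ c ∈ code, pvDig c = true) := by
  simp only [pvPairs, List.mem_cons, List.not_mem_nil, or_false] at hp
  rcases hp with rfl | rfl | rfl | rfl | rfl | rfl | rfl
  · exact ⟨['1','9','6'], by decide, by decide, by intro c hc; fin_cases hc <;> rfl⟩
  · exact ⟨['2','2','8'], by decide, by decide, by intro c hc; fin_cases hc <;> rfl⟩
  · exact ⟨['2','1','4'], by decide, by decide, by intro c hc; fin_cases hc <;> rfl⟩
  · exact ⟨['2','4','6'], by decide, by decide, by intro c hc; fin_cases hc <;> rfl⟩
  · exact ⟨['2','2','0'], by decide, by decide, by intro c hc; fin_cases hc <;> rfl⟩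
  · exact ⟨['2','5','2'], by decide, by decide, by intro c hc; fin_cases hc <;> rfl⟩
  · exact ⟨['2','2','3'], by decide, by decide, by intro c hc; fin_cases hc <;> rfl⟩

theorem pvScan_one (c : Char) : pvScan [c] = [c] := by
  rw [pvScan.eq_def]; split <;> simp_all [pvScan]

theorem pvScan_cons_ne_amp (c : Char) (t : List Char) (hc : c ≠ '&') :
    pvScan (c :: t) = c :: pvScan t := by
  rw [pvScan.eq_def]; split <;> simp_all

theorem pvScan_amp_ne_hash (c2 : Char) (t : List Char) (hc : c2 ≠ '#') :
    pvScan ('&' :: c2 :: t) = '&' :: pvScan (c2 :: t) := by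
  rw [pvScan.eq_def]
  split
  · simp_all
  · simp_all
  · rename_i heq
    rcases heq with ⟨rfl, rfl⟩
    rfl

theorem pvPairs_good : ∀ p ∈ pvPairs, p.2.head? = some '&' ∧ (∀ c ∈ p.2.tail, c ≠ '&') ∧
    p.1 ≠ '&' ∧ p.2.length = 6 := by
  intro p hp
  simp only [pvPairs, List.mem_cons, List.not_mem_nil, or_false] at hp
  rcases hp with rfl | rfl | rfl | rfl | rfl | rfl | rfl <;>
    exact ⟨rfl, by intro c hc; fin_cases hc <;> decide, by decide, rfl⟩

theorem pvPairs_mut : ∀ p ∈ pvPairs, ∀ q ∈ pvPairs, p ≠ q → ¬ p.2 <+: q.2 := by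
  intro p hp q hq hne hpre
  have hEq : p.2 = q.2 := hpre.eq_of_length (by
    rw [(pvPairs_good p hp).2.2.2, (pvPairs_good q hq).2.2.2])
  simp only [pvPairs, List.mem_cons, List.not_mem_nil, or_false] at hp hq
  rcases hp with rfl | rfl | rfl | rfl | rfl | rfl | rfl <;>
    rcases hq with rfl | rfl | rfl | rfl | rfl | rfl | rfl <;>
      first
        | exact hne rfl
        | exact absurd hEq (by decide)

theorem pvPairs_not_key : ∀ p ∈ pvPairs, ∀ q ∈ pvPairs, p.1 ∉ q.2 := by
  intro p hp q hq
  simp only [pvPairs, List.mem_cons, List.not_mem_nil, or_false] at hp hq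
  rcases hp with rfl | rfl | rfl | rfl | rfl | rfl | rfl <;>
    rcases hq with rfl | rfl | rfl | rfl | rfl | rfl | rfl <;> decide

theorem pvPairs_shape_ne (ds : List Char)
    (h1 : ds ≠ ['1','9','6']) (h2 : ds ≠ ['2','2','8']) (h3 : ds ≠ ['2','1','4'])
    (h4 : ds ≠ ['2','4','6']) (h5 : ds ≠ ['2','2','0']) (h6 : ds ≠ ['2','5','2'])
    (h7 : ds ≠ ['2','2','3']) :
    ∀ p ∈ pvPairs, ∃ code, p.2 = '&' :: '#' :: (code ++ [';']) ∧ code.length = 3 ∧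
      (∀ c ∈ code, pvDig c = true) ∧ ds ≠ code := by
  intro p hp
  simp only [pvPairs, List.mem_cons, List.not_mem_nil, or_false] at hp
  rcases hp with rfl | rfl | rfl | rfl | rfl | rfl | rfl
  · exact ⟨['1','9','6'], by decide, by decide, by intro c hc; fin_cases hc <;> rfl, h1⟩
  · exact ⟨['2','2','8'], by decide, by decide, by intro c hc; fin_cases hc <;> rfl, h2⟩
  · exact ⟨['2','1','4'], by decide, by decide, by intro c hc; fin_cases hc <;> rfl, h3⟩
  · exact ⟨['2','4','6'], by decide, by decide, by intro c hc; fin_cases hc <;> rfl, h4⟩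
  · exact ⟨['2','2','0'], by decide, by decide, by intro c hc; fin_cases hc <;> rfl, h5⟩
  · exact ⟨['2','5','2'], by decide, by decide, by intro c hc; fin_cases hc <;> rfl, h6⟩
  · exact ⟨['2','2','3'], by decide, by decide, by intro c hc; fin_cases hc <;> rfl, h7⟩

theorem pvRep_nil (k : List Char) (u : Char) : pvRep k u [] = [] := by rw [pvRep]

theorem pvFold_nil : pvFold pvPairs [] = [] := by
  simp [pvFold, pvPairs, pvRep_nil]

theorem pvScan_nil : pvScan [] = [] := by rw [pvScan]

theorem pvNoKeyPrefix_of_ne_amp (c : Char) (hc : c ≠ '&') (cs : List Char) :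
    ∀ p ∈ pvPairs, ¬ p.2 <+: c :: cs := by
  intro p hp hpre
  obtain ⟨code, hpc, -, -⟩ := pvPairs_shape p hp
  rw [hpc, List.cons_prefix_cons] at hpre
  exact hc hpre.1.symm

theorem pvMain : ∀ n (cs : List Char), cs.length ≤ n → pvFold pvPairs cs = pvScan cs := by
  intro n
  induction n with
  | zero =>
    intro cs h
    have hnil : cs = [] := List.eq_nil_of_length_eq_zero (by omega)
    subst hnil
    rw [pvFold_nil, pvScan_nil]
  | succ n ih =>
    intro cs hlen
    rcases cs with _ | ⟨c, t⟩
    · rw [pvFold_nil, pvScan_nil]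
    rcases t with _ | ⟨c2, t2⟩
    · -- single character
      rw [pvScan_one,
        pvFold_cons c pvPairs pvPairs_not_key [] (by
          intro p hp hpre
          obtain ⟨code, hpc, hc3, -⟩ := pvPairs_shape p hp
          have hl := hpre.length_le
          rw [hpc] at hl
          simp [hc3] at hl)]
      simp [pvFold_nil]
    by_cases hc : c = '&'
    · subst hc
      by_cases hc2 : c2 = '#'
      · subst hc2
        rw [pvScan]
        by_cases hcond : (pvDigits t2).1 ≠ [] ∧ (pvDigits t2).2.head? = some ';'
        · rw [if_pos hcond]
          obtain ⟨hne0, hhead⟩ := hcond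
          obtain ⟨ds, hds⟩ : ∃ ds, (pvDigits t2).1 = ds := ⟨_, rfl⟩
          rcases hr : (pvDigits t2).2 with _ | ⟨r0, r2⟩
          · rw [hr] at hhead; simp at hhead
          have hr0 : r0 = ';' := by rw [hr] at hhead; simpa using hhead
          subst hr0
          have hdig : ∀ c ∈ ds, pvDig c = true := hds ▸ pvDigits_fst_dig t2
          have hsplit : t2 = ds ++ ';' :: r2 := by
            conv_lhs => rw [pvDigits_eq t2]
            rw [hds, hr]
          rw [hds]
          subst hsplit
          simp only [List.tail_cons]
          have hlen2 : r2.length ≤ n := by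
            simp only [List.length_cons, List.length_append] at hlen; omega
          rw [hds] at hne0
          by_cases h1 : ds = ['1','9','6']
          · subst h1
            show pvFold pvPairs (['&','#','1','9','6',';'] ++ r2) = _
            rw [pvFold_hit 'Ä' ['&','#','1','9','6',';'] pvPairs pvPairs_good pvPairs_mut
              (by simp [pvPairs]) rfl r2,
              show pvEnt (['&','#','1','9','6'] ++ [';']) = ['Ä'] from by decide,
              ih r2 hlen2]
            rfl
          by_cases h2 : ds = ['2','2','8']
          · subst h2
            show pvFold pvPairs (['&','#','2','2','8',';'] ++ r2) = _
            rw [pvFold_hit 'ä' ['&','#','2','2','8',';'] pvPairs pvPairs_good pvPairs_mut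
              (by simp [pvPairs]) rfl r2,
              show pvEnt (['&','#','2','2','8'] ++ [';']) = ['ä'] from by decide,
              ih r2 hlen2]
            rfl
          by_cases h3 : ds = ['2','1','4']
          · subst h3
            show pvFold pvPairs (['&','#','2','1','4',';'] ++ r2) = _
            rw [pvFold_hit 'Ö' ['&','#','2','1','4',';'] pvPairs pvPairs_good pvPairs_mut
              (by simp [pvPairs]) rfl r2,
              show pvEnt (['&','#','2','1','4'] ++ [';']) = ['Ö'] from by decide,
              ih r2 hlen2]
            rfl
          by_cases h4 : ds = ['2','4','6']
          · subst h4
            show pvFold pvPairs (['&','#','2','4','6',';'] ++ r2) = _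
            rw [pvFold_hit 'ö' ['&','#','2','4','6',';'] pvPairs pvPairs_good pvPairs_mut
              (by simp [pvPairs]) rfl r2,
              show pvEnt (['&','#','2','4','6'] ++ [';']) = ['ö'] from by decide,
              ih r2 hlen2]
            rfl
          by_cases h5 : ds = ['2','2','0']
          · subst h5
            show pvFold pvPairs (['&','#','2','2','0',';'] ++ r2) = _
            rw [pvFold_hit 'Ü' ['&','#','2','2','0',';'] pvPairs pvPairs_good pvPairs_mut
              (by simp [pvPairs]) rfl r2,
              show pvEnt (['&','#','2','2','0'] ++ [';']) = ['Ü'] from by decide,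
              ih r2 hlen2]
            rfl
          by_cases h6 : ds = ['2','5','2']
          · subst h6
            show pvFold pvPairs (['&','#','2','5','2',';'] ++ r2) = _
            rw [pvFold_hit 'ü' ['&','#','2','5','2',';'] pvPairs pvPairs_good pvPairs_mut
              (by simp [pvPairs]) rfl r2,
              show pvEnt (['&','#','2','5','2'] ++ [';']) = ['ü'] from by decide,
              ih r2 hlen2]
            rfl
          by_cases h7 : ds = ['2','2','3']
          · subst h7
            show pvFold pvPairs (['&','#','2','2','3',';'] ++ r2) = _
            rw [pvFold_hit 'ß' ['&','#','2','2','3',';'] pvPairs pvPairs_good pvPairs_mut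
              (by simp [pvPairs]) rfl r2,
              show pvEnt (['&','#','2','2','3'] ++ [';']) = ['ß'] from by decide,
              ih r2 hlen2]
            rfl
          · simp only [List.cons_append]
            rw [pvFold_tok ds hdig pvPairs (pvPairs_shape_ne ds h1 h2 h3 h4 h5 h6 h7) r2,
              pvEnt_unknown ds h1 h2 h3 h4 h5 h6 h7, ih r2 hlen2]
            simp
        · rw [if_neg hcond]
          rw [pvFold_cons '&' pvPairs pvPairs_not_key ('#' :: t2) (by
            intro p hp hpre
            obtain ⟨code, hpc, hc3, hcd⟩ := pvPairs_shape p hp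
            rw [hpc, List.cons_prefix_cons] at hpre
            have h2 := hpre.2
            rw [List.cons_prefix_cons] at h2
            obtain ⟨r', hr'⟩ := h2.2
            have ht2 : t2 = code ++ ';' :: r' := by rw [← hr']; simp
            apply hcond
            rw [ht2, pvDigits_stop code ';' r' hcd (by decide)]
            refine ⟨?_, rfl⟩
            intro h
            simp only at h
            subst h
            simp at hc3)]
          rw [ih ('#' :: t2) (by simp only [List.length_cons] at hlen ⊢; omega)]
      · rw [pvScan_amp_ne_hash c2 t2 hc2]
        rw [pvFold_cons '&' pvPairs pvPairs_not_key (c2 :: t2) (by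
          intro p hp hpre
          obtain ⟨code, hpc, -, -⟩ := pvPairs_shape p hp
          rw [hpc, List.cons_prefix_cons] at hpre
          have h2 := hpre.2
          rw [List.cons_prefix_cons] at h2
          exact hc2 h2.1.symm)]
        rw [ih (c2 :: t2) (by simp only [List.length_cons] at hlen ⊢; omega)]
    · rw [pvScan_cons_ne_amp c (c2 :: t2) hc]
      rw [pvFold_cons c pvPairs pvPairs_not_key (c2 :: t2) (pvNoKeyPrefix_of_ne_amp c hc _)]
      rw [ih (c2 :: t2) (by simp only [List.length_cons] at hlen ⊢; omega)]

-- ===== VERDICT (by name: the statement is the Claim_ definition above) =====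
theorem replace_umlaute_spec : Claim_equal_replace_umlaute := by
  intro s _
  show replace_umlaute s = replace_umlaute_alt s
  rw [pvA_eq]
  show String.ofList (pvFold pvPairs s.toList) = String.ofList (pvScan s.toList)
  rw [pvMain s.toList.length s.toList le_rfl]
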